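-- pv_equiv track=rewrite | github.com/AlgorithmLX/JAOPCAMaterialLocalizations | lang/update_lang_keys.py | split_by_character_type_camel_case
-- ===== SOURCE A (Python) =====
-- import unicodedata
--
-- def split_by_character_type_camel_case(string: str):
--     if not string:
--         return ""
--     ret = []
--     token_start = 0
--     current_category = unicodedata.category(string[token_start])
--     for pos in range(1, len(string)):
--         category = unicodedata.category(string[pos])
--         if category == current_category:
--             continue
--         if category == "Ll" and current_category == "Lu":
--             new_token_start = pos - 1
--             if new_token_start != token_start:
--                 ret.append(string[token_start:new_token_start])
--                 token_start = new_token_start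
--         else:
--             ret.append(string[token_start:pos])
--             token_start = pos
--         current_category = category
--     ret.append(string[token_start:])
--     return " ".join(ret)
-- ===== SOURCE B (Python) =====
-- import unicodedata
-- from itertools import groupby
--
-- def split_by_character_type_camel_case(string: str):
--     # Run-level algorithm: groupby produces maximal same-category runs; a
--     # camelCase merge pass carries the last char of an Lu run (or the whole
--     # run if it is a single char) into a following Ll run.
--     groups = [(cat, "".join(chars)) for cat, chars in groupby(string, unicodedata.category)]
--     tokens = []
--     carry = ""
--     for i, (cat, run) in enumerate(groups):
--         run = carry + run
--         carry = ""
--         if cat == "Lu" and i + 1 < len(groups) and groups[i + 1][0] == "Ll":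
--             if len(run) == 1:
--                 carry = run
--                 continue
--             carry = run[-1]
--             run = run[:-1]
--         tokens.append(run)
--     return " ".join(tokens)
-- ===== Notes on version B (the rewrite author's own statement) =====
-- stated objective: alternative
-- what changed: B first materialises maximal same-category runs with itertools.groupby and then does a separate run-level merge pass with a carry for the camelCase rule, instead of A's single index/slice state machine over character positions.
import Mathlib
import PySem

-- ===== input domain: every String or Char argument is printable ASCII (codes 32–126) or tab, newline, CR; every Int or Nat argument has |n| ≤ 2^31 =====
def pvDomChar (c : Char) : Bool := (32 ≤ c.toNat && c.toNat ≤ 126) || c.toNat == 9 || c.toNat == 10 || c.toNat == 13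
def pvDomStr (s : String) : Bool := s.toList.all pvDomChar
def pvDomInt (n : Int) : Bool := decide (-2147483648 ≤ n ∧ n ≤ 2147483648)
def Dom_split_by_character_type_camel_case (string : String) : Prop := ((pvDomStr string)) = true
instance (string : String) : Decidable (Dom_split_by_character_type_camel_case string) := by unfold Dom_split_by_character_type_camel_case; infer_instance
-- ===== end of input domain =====

-- B replaces A's index/slice state machine by maximal same-category runs plus a run-level camelCase merge pass (alternative decomposition, same cost).

-- unicodedata.category, exact on the domain's characters (printable ASCII, tab, newline, CR); "Cn" outside it (unreached under Dom_)
def pvUcat (c : Char) : String :=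
  let n := c.toNat
  if 97 ≤ n && n ≤ 122 then "Ll"
  else if 65 ≤ n && n ≤ 90 then "Lu"
  else if 48 ≤ n && n ≤ 57 then "Nd"
  else if n == 32 then "Zs"
  else if n == 9 || n == 10 || n == 13 then "Cc"
  else if "!\"#%&'*,./:;?@\\".toList.contains c then "Po"
  else if c == '$' then "Sc"
  else if "([{".toList.contains c then "Ps"
  else if ")]}".toList.contains c then "Pe"
  else if "+<=>|~".toList.contains c then "Sm"
  else if c == '-' then "Pd"
  else if c == '^' || c == '`' then "Sk"
  else if c == '_' then "Pc"
  else "Cn"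

-- ===== PORT A =====
-- A's for-loop over range(1, len(string)) with state (ret, token_start, current_category),
-- as the obvious recursion over the remaining characters with pos the current index;
-- slices string[a:b] are PySem.List.slice on the code points.
def pvAGo (l : List Char) (pos : Nat) (ret : List (List Char)) (ts : Nat) (cur : String) :
    List Char → List (List Char)
  | [] => ret ++ [PySem.List.slice l (some (ts : Int)) none]          -- ret.append(string[token_start:])
  | c :: rest =>
    let category := pvUcat c
    if category == cur then pvAGo l (pos + 1) ret ts cur rest
    else if category == "Ll" && cur == "Lu" then
      let nts := pos - 1
      if nts != ts then
        pvAGo l (pos + 1) (ret ++ [PySem.List.slice l (some (ts : Int)) (some (nts : Int))]) nts category rest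
      else pvAGo l (pos + 1) ret ts category rest
    else pvAGo l (pos + 1) (ret ++ [PySem.List.slice l (some (ts : Int)) (some (pos : Int))]) pos category rest

def split_by_character_type_camel_case (string : String) : String :=
  match string.toList with
  | [] => ""                                                          -- if not string: return ""
  | c :: rest =>
    String.ofList (PySem.Chars.join [' '] (pvAGo (c :: rest) 1 [] 0 (pvUcat c) rest))  -- " ".join(ret)

-- ===== PORT B =====
-- itertools.groupby(string, unicodedata.category): maximal runs of equal category
def pvRuns : List Char → List (String × List Char)
  | [] => []
  | c :: cs =>
    match pvRuns cs with
    | (cat, r) :: t => if pvUcat c == cat then (cat, c :: r) :: t else (pvUcat c, [c]) :: (cat, r) :: t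
    | [] => [(pvUcat c, [c])]

-- B's loop over the groups with lookahead groups[i+1] and the carry string;
-- run[:-1] is dropLast, run[-1] is getLast! (run is nonempty there)
def pvNextLl : List (String × List Char) → Bool
  | (cat2, _) :: _ => cat2 == "Ll"
  | [] => false

def pvBGo (carry : List Char) : List (String × List Char) → List (List Char)
  | [] => []
  | (cat, run) :: t =>
    let run := carry ++ run
    if cat == "Lu" && pvNextLl t then
      if run.length == 1 then pvBGo run t
      else run.dropLast :: pvBGo [run.getLast!] t
    else run :: pvBGo [] t

def split_by_character_type_camel_case_alt (string : String) : String :=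
  String.ofList (PySem.Chars.join [' '] (pvBGo [] (pvRuns string.toList)))

-- ===== PRECONDITION & SPEC =====
def Spec_split_by_character_type_camel_case (string : String) (out : String) : Prop := out = split_by_character_type_camel_case_alt string
instance (string : String) (out : String) : Decidable (Spec_split_by_character_type_camel_case string out) := by unfold Spec_split_by_character_type_camel_case; infer_instance

-- ===== CLAIM (what is proved, stated in full; the proofs are below) =====
def Claim_equal_split_by_character_type_camel_case : Prop := ∀ (string : String), Dom_split_by_character_type_camel_case string → Spec_split_by_character_type_camel_case string (split_by_character_type_camel_case string)

-- ===== LEMMAS AND PROOFS =====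

-- canonical char-at-a-time tokenizer both ports are reduced to
def pvTgo (acc : List Char) (cur : String) : List Char → List (List Char)
  | [] => [acc]
  | c :: rest =>
    let cat := pvUcat c
    if cat == cur then pvTgo (acc ++ [c]) cur rest
    else if cat == "Ll" && cur == "Lu" then
      if acc.length == 1 then pvTgo (acc ++ [c]) cat rest
      else acc.dropLast :: pvTgo ([acc.getLast!] ++ [c]) cat rest
    else acc :: pvTgo [c] cat rest

def pvFlat (gs : List (String × List Char)) : List Char := (gs.map Prod.snd).flatten

def pvGood : List (String × List Char) → Prop
  | [] => True
  | (cat, run) :: t => run ≠ [] ∧ (∀ c ∈ run, pvUcat c = cat) ∧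
      (match t with | (cat2, _) :: _ => cat2 ≠ cat | [] => True) ∧ pvGood t

lemma pvTgo_extend (run : List Char) : ∀ (acc : List Char) (cur : String) (rest : List Char),
    (∀ c ∈ run, pvUcat c = cur) → pvTgo acc cur (run ++ rest) = pvTgo (acc ++ run) cur rest := by
  induction run with
  | nil => simp
  | cons c run' ih =>
    intro acc cur rest h
    have hc : pvUcat c = cur := h c (by simp)
    simp only [List.cons_append, pvTgo, hc, beq_self_eq_true, if_true]
    rw [ih (acc ++ [c]) cur rest (fun x hx => h x (by simp [hx]))]
    simp

lemma pvRuns_good : ∀ l : List Char, pvGood (pvRuns l) := by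
  intro l
  induction l with
  | nil => simp [pvRuns, pvGood]
  | cons c cs ih =>
    simp only [pvRuns]
    cases hr : pvRuns cs with
    | nil => simp [pvGood]
    | cons g t =>
      obtain ⟨cat, r⟩ := g
      rw [hr] at ih
      by_cases hc : pvUcat c = cat
      · simp only [hc, beq_self_eq_true, if_true, pvGood]
        obtain ⟨h1, h2, h3, h4⟩ := ih
        refine ⟨by simp, ?_, h3, h4⟩
        intro x hx
        rcases List.mem_cons.mp hx with h | h
        · simp [h, hc]
        · exact h2 x h
      · simp only [beq_eq_false_iff_ne.mpr hc]
        exact ⟨by simp, by intro x hx; simp at hx; simp [hx], fun h => hc h.symm, ih⟩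

lemma pvRuns_flat : ∀ l : List Char, pvFlat (pvRuns l) = l := by
  intro l
  induction l with
  | nil => simp [pvRuns, pvFlat]
  | cons c cs ih =>
    simp only [pvRuns]
    cases hr : pvRuns cs with
    | nil =>
      rw [hr] at ih; simp [pvFlat] at ih ⊢; exact ih
    | cons g t =>
      obtain ⟨cat, r⟩ := g
      rw [hr] at ih
      by_cases hc : pvUcat c = cat
      · simp only [hc, beq_self_eq_true, if_true, pvFlat] at ih ⊢
        simpa using ih
      · simp only [beq_eq_false_iff_ne.mpr hc, pvFlat] at ih ⊢
        simpa using ih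

lemma pvRuns_shape (c : Char) (cs : List Char) :
    ∃ r t, pvRuns (c :: cs) = (pvUcat c, c :: r) :: t := by
  simp only [pvRuns]
  cases hr : pvRuns cs with
  | nil => exact ⟨[], [], rfl⟩
  | cons g t =>
    obtain ⟨cat, r⟩ := g
    by_cases hc : pvUcat c = cat
    · refine ⟨r, t, ?_⟩; simp [hc]
    · refine ⟨[], (cat, r) :: t, ?_⟩; simp [beq_eq_false_iff_ne.mpr hc]


lemma pvTgo_cons (acc : List Char) (cur : String) (c : Char) (rest : List Char) :
    pvTgo acc cur (c :: rest) =
      if pvUcat c == cur then pvTgo (acc ++ [c]) cur rest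
      else if pvUcat c == "Ll" && cur == "Lu" then
        (if acc.length == 1 then pvTgo (acc ++ [c]) (pvUcat c) rest
         else acc.dropLast :: pvTgo ([acc.getLast!] ++ [c]) (pvUcat c) rest)
      else acc :: pvTgo [c] (pvUcat c) rest := rfl

lemma pvBGo_cons (carry : List Char) (cat : String) (run : List Char)
    (t : List (String × List Char)) :
    pvBGo carry ((cat, run) :: t) =
      if cat == "Lu" && pvNextLl t then
        (if (carry ++ run).length == 1 then pvBGo (carry ++ run) t
         else (carry ++ run).dropLast :: pvBGo [(carry ++ run).getLast!] t)
      else (carry ++ run) :: pvBGo [] t := rfl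

-- main run-level lemma: pvTgo entered at a group boundary equals pvBGo with the carry
lemma pvMain : ∀ (gs : List (String × List Char)) (pre : List Char) (cat : String) (c : Char)
    (run' : List Char) (t : List (String × List Char)),
    gs = (cat, c :: run') :: t → pvGood gs →
    pvTgo (pre ++ [c]) cat (run' ++ pvFlat t) = pvBGo pre gs := by
  intro gs
  induction gs with
  | nil => intro _ _ _ _ _ h; exact absurd h (by simp)
  | cons g t0 ih =>
    intro pre cat c run' t heq hgood
    injection heq with h1 h2
    subst h1; subst h2
    obtain ⟨_, hchars, hadj, hgt⟩ := hgood
    -- consume the rest of the first run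
    have hrun' : ∀ x ∈ run', pvUcat x = cat := fun x hx => hchars x (by simp [hx])
    rw [pvTgo_extend run' (pre ++ [c]) cat (pvFlat t0) hrun']
    have hR : pre ++ [c] ++ run' = pre ++ (c :: run') := by simp
    rw [hR]
    set R := pre ++ (c :: run') with hRdef
    cases t0 with
    | nil =>
      rw [show pvFlat ([] : List (String × List Char)) = [] from rfl]
      rw [pvBGo_cons, if_neg (by simp [pvNextLl])]
      rfl
    | cons g2 t' =>
      obtain ⟨cat2, r2⟩ := g2
      have hgt' := hgt
      obtain ⟨hr2ne, hr2chars, _, _⟩ := hgt'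
      obtain ⟨d, r2', rfl⟩ : ∃ d r2', r2 = d :: r2' := by
        cases r2 with
        | nil => exact absurd rfl hr2ne
        | cons d r2' => exact ⟨d, r2', rfl⟩
      have hne : cat2 ≠ cat := hadj
      have hd : pvUcat d = cat2 := hr2chars d (by simp)
      have hflat : pvFlat ((cat2, d :: r2') :: t') = d :: (r2' ++ pvFlat t') := by simp [pvFlat]
      rw [hflat]
      have hdne : ¬ ((pvUcat d == cat) = true) := by simp [hd]; exact hne
      by_cases hcam : cat = "Lu" ∧ cat2 = "Ll"
      · -- camelCase merge point
        have hccond : (cat == "Lu" && pvNextLl ((cat2, d :: r2') :: t')) = true := by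
          simp [pvNextLl, hcam.1, hcam.2]
        have htcond : (pvUcat d == "Ll" && (cat == "Lu")) = true := by
          simp [hd, hcam.1, hcam.2]
        by_cases hlen : R.length = 1
        · rw [pvTgo_cons, if_neg hdne, if_pos htcond, if_pos (by simp [hlen])]
          conv_rhs => rw [pvBGo_cons]
          rw [if_pos hccond, if_pos (by simp [hRdef] at hlen ⊢; omega)]
          rw [hd]
          exact ih R cat2 d r2' t' rfl hgt
        · rw [pvTgo_cons, if_neg hdne, if_pos htcond, if_neg (by simp [hlen])]
          conv_rhs => rw [pvBGo_cons]
          rw [if_pos hccond, if_neg (by simp [hRdef] at hlen ⊢; omega)]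
          rw [hd, ih [R.getLast!] cat2 d r2' t' rfl hgt]
      · -- ordinary boundary: emit R and start fresh
        have htcond : ¬ ((pvUcat d == "Ll" && (cat == "Lu")) = true) := by
          simp [hd]; intro h1 h2; exact hcam ⟨h2, h1⟩
        have hccond : ¬ ((cat == "Lu" && pvNextLl ((cat2, d :: r2') :: t')) = true) := by
          simp [pvNextLl]; intro h1 h2; exact hcam ⟨h1, h2⟩
        rw [pvTgo_cons, if_neg hdne, if_neg htcond]
        conv_rhs => rw [pvBGo_cons]
        rw [if_neg hccond]
        rw [hd, show ([d] : List Char) = [] ++ [d] from rfl, ih [] cat2 d r2' t' rfl hgt]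

-- A-side: the index/slice state machine equals pvTgo on the accumulated token
lemma pvA_tgo : ∀ (rest l : List Char) (pos ts : Nat) (ret : List (List Char)) (cur : String),
    ts < pos → pos ≤ l.length → rest = l.drop pos →
    pvAGo l pos ret ts cur rest = ret ++ pvTgo ((l.drop ts).take (pos - ts)) cur rest := by
  intro rest
  induction rest with
  | nil =>
    intro l pos ts ret cur hts hpos hdrop
    have hlen : l.length ≤ pos := by
      have := congrArg List.length hdrop; simp at this; omega
    have hpe : pos = l.length := le_antisymm hpos hlen
    simp only [pvAGo, pvTgo]
    rw [PySem.List.slice_from_natCast]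
    congr 2
    rw [List.take_of_length_le (by simp; omega)]
  | cons c rest' ih =>
    intro l pos ts ret cur hts hpos hdrop
    have hposlt : pos < l.length := by
      by_contra h
      rw [List.drop_eq_nil_of_le (by omega)] at hdrop
      exact absurd hdrop (by simp)
    have hdec : l.drop pos = l[pos] :: l.drop (pos + 1) := List.drop_eq_getElem_cons hposlt
    rw [hdec] at hdrop
    injection hdrop with hc hrest'
    have htslt : ts < l.length := by omega
    have hacc_succ : (l.drop ts).take (pos - ts) ++ [c] = (l.drop ts).take (pos + 1 - ts) := by
      have h1 : pos + 1 - ts = (pos - ts) + 1 := by omega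
      rw [h1, List.take_add_one]
      have h2 : pos - ts < (l.drop ts).length := by simp; omega
      rw [List.getElem?_eq_getElem h2]
      simp [List.getElem_drop, hc, show ts + (pos - ts) = pos from by omega]
    simp only [pvAGo, pvTgo]
    by_cases h1 : pvUcat c = cur
    · simp only [h1, beq_self_eq_true, if_true]
      rw [ih l (pos + 1) ts ret cur (by omega) (by omega) hrest', hacc_succ]
    · have h1' : (pvUcat c == cur) = false := beq_eq_false_iff_ne.mpr h1
      simp only [h1', Bool.false_eq_true, if_false]
      by_cases h2 : pvUcat c = "Ll" ∧ cur = "Lu"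
      · have h2' : (pvUcat c == "Ll" && (cur == "Lu")) = true := by simp [h2.1, h2.2]
        simp only [h2', if_true]
        by_cases h3 : pos - 1 = ts
        · have h3' : (pos - 1 != ts) = false := by simp [h3]
          have hlen1 : ((l.drop ts).take (pos - ts)).length = 1 := by
            simp; omega
          simp only [h3', Bool.false_eq_true, if_false, hlen1, beq_self_eq_true, if_true]
          rw [ih l (pos + 1) ts ret (pvUcat c) (by omega) (by omega) hrest', hacc_succ]
        · have h3' : (pos - 1 != ts) = true := by simp [h3]
          have hlenne : (((l.drop ts).take (pos - ts)).length == 1) = false := by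
            simp only [List.length_take, List.length_drop]
            have : min (pos - ts) (l.length - ts) = pos - ts := by omega
            rw [this]
            simp only [beq_eq_false_iff_ne]
            omega
          simp only [h3', if_true, hlenne, Bool.false_eq_true, if_false]
          rw [ih l (pos + 1) (pos - 1) (ret ++ [PySem.List.slice l (some (ts : Int)) (some ((pos - 1 : Nat) : Int))]) (pvUcat c) (by omega) (by omega) hrest']
          rw [PySem.List.slice_natCast]
          -- string[token_start:pos-1] = acc.dropLast
          have hdl : ((l.drop ts).take (pos - ts)).dropLast = (l.drop ts).take (pos - 1 - ts) := by
            rw [List.dropLast_eq_take]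
            rw [List.take_take]
            congr 1
            simp only [List.length_take, List.length_drop]
            omega
          -- acc.getLast! = l[pos-1] and the new 2-char token
          have hsplit : (l.drop ts).take (pos - ts) = (l.drop ts).take (pos - 1 - ts) ++ [l[pos - 1]] := by
            have h4 : pos - ts = (pos - 1 - ts) + 1 := by omega
            rw [h4, List.take_add_one]
            have h5 : pos - 1 - ts < (l.drop ts).length := by simp; omega
            rw [List.getElem?_eq_getElem h5]
            simp [List.getElem_drop, show ts + (pos - 1 - ts) = pos - 1 from by omega]
          have hlast : ((l.drop ts).take (pos - ts)).getLast! = l[pos - 1] := by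
            rw [hsplit]
            simp [List.getLast!_eq_getLast?_getD, List.getLast?_append]
          have hnew : ([((l.drop ts).take (pos - ts)).getLast!] ++ [c]) =
              (l.drop (pos - 1)).take (pos + 1 - (pos - 1)) := by
            have h6 : pos + 1 - (pos - 1) = 2 := by omega
            have h7 : l.drop (pos - 1) = l[pos - 1] :: l.drop pos := by
              have := List.drop_eq_getElem_cons (l := l) (i := pos - 1) (by omega)
              simpa [show pos - 1 + 1 = pos from by omega] using this
            rw [h6, h7, hdec, hlast, hc]
            rfl
          rw [hdl, hnew]
          simp
      · have h2' : (pvUcat c == "Ll" && (cur == "Lu")) = false := by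
          by_cases ha : pvUcat c = "Ll" <;> by_cases hb : cur = "Lu" <;> simp_all
        simp only [h2', Bool.false_eq_true, if_false]
        rw [ih l (pos + 1) pos (ret ++ [PySem.List.slice l (some (ts : Int)) (some (pos : Int))]) (pvUcat c) (by omega) (by omega) hrest']
        rw [PySem.List.slice_natCast]
        have h8 : (l.drop pos).take (pos + 1 - pos) = [c] := by
          rw [show pos + 1 - pos = 1 from by omega, hdec, hc]
          rfl
        rw [h8]
        simp

-- ===== VERDICT (by name: the statement is the Claim_ definition above) =====
theorem split_by_character_type_camel_case_spec : Claim_equal_split_by_character_type_camel_case := by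
  intro string _
  unfold Spec_split_by_character_type_camel_case
  unfold split_by_character_type_camel_case split_by_character_type_camel_case_alt
  cases hl : string.toList with
  | nil => simp [pvRuns, pvBGo, PySem.Chars.join, List.intercalate]
  | cons c rest =>
    dsimp only
    obtain ⟨r, t, hruns⟩ := pvRuns_shape c rest
    have hgood := pvRuns_good (c :: rest)
    have hflat := pvRuns_flat (c :: rest)
    rw [hruns] at hgood hflat
    have hrest : rest = r ++ pvFlat t := by
      simp only [pvFlat] at hflat ⊢
      simp at hflat
      exact hflat.symm
    have hA := pvA_tgo rest (c :: rest) 1 0 [] (pvUcat c)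
      (by omega) (by simp) (by simp)
    rw [hA]
    simp only [List.drop_zero, List.nil_append]
    have htake : (c :: rest).take (1 - 0) = [c] := by simp
    rw [htake]
    have hM := pvMain ((pvUcat c, c :: r) :: t) [] (pvUcat c) c r t rfl hgood
    simp only [List.nil_append] at hM
    rw [hruns, hrest, hM]
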